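-- pv_equiv track=rewrite | github.com/triple-lariat/edenAHcheckerPY | edenbotcogs/coghelpers/Misc_helper.py | get_tnl
-- ===== SOURCE A (Python) =====
-- exp_tnl = {
--     1: 500,
--     2: 750,
--     3: 1000,
--     4: 1250,
--     5: 1500,
--     6: 1750,
--     7: 2000,
--     8: 2200,
--     9: 2400,
--     10: 2600,
--     11: 2800,
--     12: 3000,
--     13: 3200,
--     14: 3400,
--     15: 3600,
--     16: 3800,
--     17: 4000,
--     18: 4200,
--     19: 4400,
--     20: 4600,
--     21: 4800,
--     22: 5000,
--     23: 5100,
--     24: 5200,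
--     25: 5300,
--     26: 5400,
--     27: 5500,
--     28: 5600,
--     29: 5700,
--     30: 5800,
--     31: 5900,
--     32: 6000,
--     33: 6100,
--     34: 6200,
--     35: 6300,
--     36: 6400,
--     37: 6500,
--     38: 6600,
--     39: 6700,
--     40: 6800,
--     41: 6900,
--     42: 7000,
--     43: 7100,
--     44: 7200,
--     45: 7300,
--     46: 7400,
--     47: 7500,
--     48: 7600,
--     49: 7700,
--     50: 7800,
--     51: 8000,
--     52: 9200,
--     53: 10400,
--     54: 11600,
--     55: 12800,
--     56: 14000,
--     57: 15200,
--     58: 16400,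
--     59: 17600,
--     60: 18800,
--     61: 20000,
--     62: 21500,
--     63: 23000,
--     64: 24500,
--     65: 26000,
--     66: 27500,
--     67: 29000,
--     68: 30500,
--     69: 32000,
--     70: 34000,
--     71: 36000,
--     72: 38000,
--     73: 40000,
--     74: 42000,
--     75: 44000
-- }
--
-- def get_tnl(init_lv, target_lv):
--     if init_lv not in exp_tnl or target_lv not in exp_tnl:
--         return "Invalid levels provided."
--     if init_lv > target_lv:
--         return "Target level less than initial level."
--     tnl = 0
--     for level in range(init_lv, target_lv):
--         tnl += exp_tnl[level]
--     return f"Exp from Level {init_lv} to Level {target_lv} is {tnl}."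
-- ===== SOURCE B (Python) =====
-- # Module-level prefix-sum table: pre[k] = total exp from level 1 up to (but not
-- # including) level k, so any range sum is a single subtraction.
-- pre = [0, 0, 500, 1250, 2250, 3500, 5000, 6750, 8750, 10950, 13350, 15950,
--        18750, 21750, 24950, 28350, 31950, 35750, 39750, 43950, 48350, 52950,
--        57750, 62750, 67850, 73050, 78350, 83750, 89250, 94850, 100550, 106350,
--        112250, 118250, 124350, 130550, 136850, 143250, 149750, 156350, 163050,
--        169850, 176750, 183750, 190850, 198050, 205350, 212750, 220250, 227850,
--        235550, 243350, 251350, 260550, 270950, 282550, 295350, 309350, 324550,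
--        340950, 358550, 377350, 397350, 418850, 441850, 466350, 492350, 519850,
--        548850, 579350, 611350, 645350, 681350, 719350, 759350, 801350]
--
--
-- def get_tnl(init_lv, target_lv):
--     # exp_tnl's keys are exactly the levels 1..75, so membership is a range check
--     if not (1 <= init_lv <= 75 and 1 <= target_lv <= 75):
--         return "Invalid levels provided."
--     if init_lv > target_lv:
--         return "Target level less than initial level."
--     tnl = pre[target_lv] - pre[init_lv]
--     return f"Exp from Level {init_lv} to Level {target_lv} is {tnl}."
-- ===== Notes on version B (the rewrite author's own statement) =====
-- stated objective: faster
-- what changed: Replaced the per-level summation loop over range(init_lv, target_lv) by a module-level prefix-sum table so the exp total is a single subtraction pre[target_lv] - pre[init_lv], and the dict-membership guard by the equivalent range check 1 <= lv <= 75 (exp_tnl's keys are exactly 1..75); guard strings and the formatted result are unchanged.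
import Mathlib
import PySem

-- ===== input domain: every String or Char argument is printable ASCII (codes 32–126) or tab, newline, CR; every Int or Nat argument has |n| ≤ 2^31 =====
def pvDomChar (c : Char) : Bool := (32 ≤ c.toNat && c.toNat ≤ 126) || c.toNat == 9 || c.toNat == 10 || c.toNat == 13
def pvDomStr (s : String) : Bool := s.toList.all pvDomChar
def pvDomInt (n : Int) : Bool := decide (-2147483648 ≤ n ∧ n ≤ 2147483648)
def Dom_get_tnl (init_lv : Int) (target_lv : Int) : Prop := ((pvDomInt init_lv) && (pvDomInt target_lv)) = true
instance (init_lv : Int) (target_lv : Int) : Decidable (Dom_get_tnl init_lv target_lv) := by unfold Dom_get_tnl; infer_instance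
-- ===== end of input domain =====

-- B replaces A's per-level summation loop by a precomputed prefix-sum table, so the
-- range sum becomes a single subtraction (objective: faster, constant work per call).

-- ===== PORT A =====
def expTnl : PySem.Dict Int Int := PySem.Dict.mk [(1, 500), (2, 750), (3, 1000),
  (4, 1250), (5, 1500), (6, 1750), (7, 2000), (8, 2200), (9, 2400), (10, 2600),
  (11, 2800), (12, 3000), (13, 3200), (14, 3400), (15, 3600), (16, 3800),
  (17, 4000), (18, 4200), (19, 4400), (20, 4600), (21, 4800), (22, 5000),
  (23, 5100), (24, 5200), (25, 5300), (26, 5400), (27, 5500), (28, 5600),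
  (29, 5700), (30, 5800), (31, 5900), (32, 6000), (33, 6100), (34, 6200),
  (35, 6300), (36, 6400), (37, 6500), (38, 6600), (39, 6700), (40, 6800),
  (41, 6900), (42, 7000), (43, 7100), (44, 7200), (45, 7300), (46, 7400),
  (47, 7500), (48, 7600), (49, 7700), (50, 7800), (51, 8000), (52, 9200),
  (53, 10400), (54, 11600), (55, 12800), (56, 14000), (57, 15200), (58, 16400),
  (59, 17600), (60, 18800), (61, 20000), (62, 21500), (63, 23000), (64, 24500),
  (65, 26000), (66, 27500), (67, 29000), (68, 30500), (69, 32000), (70, 34000),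
  (71, 36000), (72, 38000), (73, 40000), (74, 42000), (75, 44000)]

-- exp_tnl[level] inside the loop cannot miss (guards ensure the key is present),
-- so the default of getD is never used.
def get_tnl (init_lv : Int) (target_lv : Int) : String :=
  if (expTnl.get? init_lv).isNone || (expTnl.get? target_lv).isNone then
    "Invalid levels provided."
  else if init_lv > target_lv then
    "Target level less than initial level."
  else
    let tnl := (PySem.List.pyRange init_lv target_lv 1).foldl
      (fun acc level => acc + expTnl.getD level 0) 0
    "Exp from Level " ++ PySem.Int.toStr init_lv ++ " to Level " ++
      PySem.Int.toStr target_lv ++ " is " ++ PySem.Int.toStr tnl ++ "."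

-- ===== PORT B =====
-- pre[k] = total exp from level 1 up to (but not including) level k
def preTbl : List Int := [0, 0, 500, 1250, 2250, 3500, 5000, 6750, 8750, 10950,
  13350, 15950, 18750, 21750, 24950, 28350, 31950, 35750, 39750, 43950, 48350,
  52950, 57750, 62750, 67850, 73050, 78350, 83750, 89250, 94850, 100550, 106350,
  112250, 118250, 124350, 130550, 136850, 143250, 149750, 156350, 163050,
  169850, 176750, 183750, 190850, 198050, 205350, 212750, 220250, 227850,
  235550, 243350, 251350, 260550, 270950, 282550, 295350, 309350, 324550,
  340950, 358550, 377350, 397350, 418850, 441850, 466350, 492350, 519850,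
  548850, 579350, 611350, 645350, 681350, 719350, 759350, 801350]

-- exp_tnl's keys are exactly the levels 1..75, so B's membership guard is a range
-- check; pre[lv] indexing cannot go out of range under the guards, pyGetD with
-- default 0 is exact there.
def get_tnl_alt (init_lv : Int) (target_lv : Int) : String :=
  if ¬(1 ≤ init_lv ∧ init_lv ≤ 75 ∧ 1 ≤ target_lv ∧ target_lv ≤ 75) then
    "Invalid levels provided."
  else if init_lv > target_lv then
    "Target level less than initial level."
  else
    let tnl := PySem.List.pyGetD preTbl target_lv 0 - PySem.List.pyGetD preTbl init_lv 0
    "Exp from Level " ++ PySem.Int.toStr init_lv ++ " to Level " ++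
      PySem.Int.toStr target_lv ++ " is " ++ PySem.Int.toStr tnl ++ "."

-- ===== PRECONDITION & SPEC =====
def Spec_get_tnl (init_lv : Int) (target_lv : Int) (out : String) : Prop := out = get_tnl_alt init_lv target_lv
instance (init_lv : Int) (target_lv : Int) (out : String) : Decidable (Spec_get_tnl init_lv target_lv out) := by unfold Spec_get_tnl; infer_instance

-- ===== CLAIM (what is proved, stated in full; the proofs are below) =====
def Claim_equal_get_tnl : Prop := ∀ (init_lv : Int) (target_lv : Int), Dom_get_tnl init_lv target_lv → Spec_get_tnl init_lv target_lv (get_tnl init_lv target_lv)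

-- ===== LEMMAS AND PROOFS =====

-- a key is absent from exp_tnl iff it is outside the levels 1..75
lemma get?_none_iff (x : Int) : (expTnl.get? x).isNone = true ↔ ¬(1 ≤ x ∧ x ≤ 75) := by
  rw [Option.isNone_iff_eq_none, PySem.Dict.get?_eq_none_iff_not_mem_keys]
  simp only [expTnl, PySem.Dict.keys_mk, List.map_cons, List.map_nil, List.mem_cons,
    List.not_mem_nil, or_false]
  omega

-- one step of the prefix table: pre[k+1] - pre[k] = exp_tnl[k] for 1 ≤ k ≤ 75
set_option maxRecDepth 100000 in
lemma pre_step : ∀ m : Nat, m < 75 → 1 ≤ m →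
    PySem.List.pyGetD preTbl ((m : Int) + 1) 0 - PySem.List.pyGetD preTbl (m : Int) 0
      = expTnl.getD (m : Int) 0 := by
  decide

-- the range sum equals the prefix difference
lemma sum_eq_pre (n : Nat) : ∀ a : Int, 1 ≤ a → a + n ≤ 75 →
    (PySem.List.pyRange a (a + n) 1).foldl (fun acc level => acc + expTnl.getD level 0) 0
      = PySem.List.pyGetD preTbl (a + n) 0 - PySem.List.pyGetD preTbl a 0 := by
  induction n with
  | zero =>
    intro a _ _
    have h0 : (a + ((0 : Nat) : Int)) = a := by simp
    rw [h0, PySem.List.pyRange_one_eq_nil (le_refl a)]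
    simp
  | succ n ih =>
    intro a ha hb
    have hb' : a + (n : Int) ≤ 74 := by push_cast at hb; omega
    have h1 : a ≤ a + (n : Int) := by omega
    have hsplit : PySem.List.pyRange a (a + ((n + 1 : Nat) : Int)) 1
        = PySem.List.pyRange a (a + (n : Int)) 1 ++ [a + (n : Int)] := by
      have he : (a + ((n + 1 : Nat) : Int)) = (a + (n : Int)) + 1 := by push_cast; ring
      rw [he, PySem.List.pyRange_one_succ_right h1]
    rw [hsplit, List.foldl_append]
    simp only [List.foldl_cons, List.foldl_nil]
    rw [ih a ha (by omega)]
    obtain ⟨m, hm⟩ : ∃ m : Nat, (a + (n : Int)) = (m : Int) := ⟨(a + (n : Int)).toNat, by omega⟩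
    have hstep := pre_step m (by omega) (by omega)
    rw [hm]
    rw [show (a + ((n + 1 : Nat) : Int)) = (m : Int) + 1 from by push_cast; omega]
    omega

-- ===== VERDICT (by name: the statement is the Claim_ definition above) =====
theorem get_tnl_spec : Claim_equal_get_tnl := by
  intro i t _
  unfold Spec_get_tnl get_tnl get_tnl_alt
  by_cases hv : 1 ≤ i ∧ i ≤ 75 ∧ 1 ≤ t ∧ t ≤ 75
  · have h1 : ¬(((expTnl.get? i).isNone || (expTnl.get? t).isNone) = true) := by
      simp only [Bool.or_eq_true, get?_none_iff]
      omega
    rw [if_neg h1, if_neg (not_not_intro hv)]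
    by_cases hlt : i > t
    · rw [if_pos hlt, if_pos hlt]
    · rw [if_neg hlt, if_neg hlt]
      obtain ⟨hi1, hi2, ht1, ht2⟩ := hv
      have hn : t = i + (((t - i).toNat : Nat) : Int) := by omega
      have hsum := sum_eq_pre (t - i).toNat i hi1 (by omega)
      rw [← hn] at hsum
      rw [hsum]
  · have h1 : ((expTnl.get? i).isNone || (expTnl.get? t).isNone) = true := by
      simp only [Bool.or_eq_true, get?_none_iff]
      omega
    rw [if_pos h1, if_pos hv]
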